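-- pv_equiv track=rewrite | github.com/seksariadivisha-bit/ComplianceIQ | engine.py | matches_directory_entry
-- ===== SOURCE A (Python) =====
-- from typing import Any
--
-- LEGAL_SUFFIX_TOKENS = {
--     "private",
--     "pvt",
--     "public",
--     "limited",
--     "ltd",
--     "llp",
--     "corporation",
--     "corp",
--     "company",
--     "co",
--     "inc",
--     "incorporated",
-- }
--
-- def normalize_company_name(name: str) -> str:
--     cleaned = "".join(ch.lower() if ch.isalnum() or ch.isspace() else " " for ch in name)
--     return " ".join(cleaned.split())
--
-- def normalize_company_core(name: str) -> str:
--     normalized = normalize_company_name(name)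
--     tokens = [token for token in normalized.split() if token not in LEGAL_SUFFIX_TOKENS]
--     return " ".join(tokens) if tokens else normalized
--
-- def matches_directory_entry(candidate_name: str, entry: dict[str, Any]) -> bool:
--     candidate = normalize_company_name(candidate_name)
--     candidate_core = normalize_company_core(candidate_name)
--
--     alias_names = [normalize_company_name(alias) for alias in entry["aliases"]]
--     alias_cores = [normalize_company_core(alias) for alias in entry["aliases"]]
--
--     if candidate in alias_names or candidate in alias_cores:
--         return True
--     if candidate_core and (candidate_core in alias_names or candidate_core in alias_cores):
--         return True
--
--     if candidate_core:
--         candidate_tokens = candidate_core.split()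
--         for alias_core in alias_cores:
--             if not alias_core:
--                 continue
--             if candidate_core == alias_core:
--                 return True
--             if candidate_core.startswith(alias_core + " ") or alias_core.startswith(candidate_core + " "):
--                 return True
--
--             alias_tokens = alias_core.split()
--             if candidate_tokens and alias_tokens:
--                 overlap = len(set(candidate_tokens) & set(alias_tokens))
--                 if overlap == min(len(candidate_tokens), len(alias_tokens)) and overlap >= 2:
--                     return True
--
--     return False
-- ===== SOURCE B (Python) =====
-- LEGAL_SUFFIX_TOKENS = {
--     "private", "pvt", "public", "limited", "ltd", "llp",
--     "corporation", "corp", "company", "co", "inc", "incorporated",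
-- }
--
-- def normalize_company_name(name: str) -> str:
--     cleaned = "".join(ch.lower() if ch.isalnum() or ch.isspace() else " " for ch in name)
--     return " ".join(cleaned.split())
--
-- def normalize_company_core(name: str) -> str:
--     normalized = normalize_company_name(name)
--     tokens = [token for token in normalized.split() if token not in LEGAL_SUFFIX_TOKENS]
--     return " ".join(tokens) if tokens else normalized
--
-- def _alias_matches(candidate: str, candidate_core: str, candidate_tokens: list, alias: str) -> bool:
--     alias_name = normalize_company_name(alias)
--     alias_core = normalize_company_core(alias)
--     if candidate == alias_name or candidate == alias_core:
--         return True
--     if candidate_core and (candidate_core == alias_name or candidate_core == alias_core):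
--         return True
--     if candidate_core and alias_core:
--         if candidate_core.startswith(alias_core + " ") or alias_core.startswith(candidate_core + " "):
--             return True
--         alias_tokens = alias_core.split()
--         if candidate_tokens and alias_tokens:
--             overlap = len(set(candidate_tokens) & set(alias_tokens))
--             if overlap == min(len(candidate_tokens), len(alias_tokens)) and overlap >= 2:
--                 return True
--     return False
--
-- def matches_directory_entry(candidate_name: str, entry) -> bool:
--     candidate = normalize_company_name(candidate_name)
--     candidate_core = normalize_company_core(candidate_name)
--     candidate_tokens = candidate_core.split()
--     return any(_alias_matches(candidate, candidate_core, candidate_tokens, alias)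
--                for alias in entry["aliases"])
-- ===== Notes on version B (the rewrite author's own statement) =====
-- stated objective: alternative
-- what changed: B replaces A's two pre-built normalized alias lists, two membership scans and a separate loop over alias cores by a single fused pass over the aliases that normalizes each alias once and tests all match conditions per alias.
import Mathlib
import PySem

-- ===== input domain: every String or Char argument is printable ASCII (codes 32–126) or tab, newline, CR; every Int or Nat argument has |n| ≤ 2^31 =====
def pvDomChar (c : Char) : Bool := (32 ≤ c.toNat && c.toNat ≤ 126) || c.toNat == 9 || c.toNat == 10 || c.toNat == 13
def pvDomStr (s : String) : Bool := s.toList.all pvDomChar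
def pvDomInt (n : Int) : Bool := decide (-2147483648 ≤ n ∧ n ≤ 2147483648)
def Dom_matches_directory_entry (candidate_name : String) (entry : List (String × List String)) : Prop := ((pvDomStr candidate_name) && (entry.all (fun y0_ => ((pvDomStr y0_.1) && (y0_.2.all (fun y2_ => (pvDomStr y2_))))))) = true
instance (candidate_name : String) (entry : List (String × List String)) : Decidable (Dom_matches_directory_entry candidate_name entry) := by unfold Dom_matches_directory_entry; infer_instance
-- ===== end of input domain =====

-- B fuses A's four separate scans (two prebuilt normalized lists + two membership passes + a loop)
-- into one pass over the aliases with a per-alias predicate; objective: alternative decomposition, same asymptotic cost.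
-- A raises KeyError when entry has no "aliases" key; Pre_ excludes exactly that.


-- ===== PORT A =====
-- shared module-level helpers (both Pythons use the same normalize_company_name / normalize_company_core)
def pvLegalSuffixTokens : List (List Char) :=
  ["private".toList, "pvt".toList, "public".toList, "limited".toList, "ltd".toList, "llp".toList,
   "corporation".toList, "corp".toList, "company".toList, "co".toList, "inc".toList, "incorporated".toList]

def pvNormName (cs : List Char) : List Char :=
  let cleaned := cs.map (fun ch => if PySem.Chars.isalnum ch || PySem.Chars.isspace ch then PySem.Chars.lowerChar ch else ' ')
  PySem.Chars.join [' '] (PySem.Chars.split₀ cleaned)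

def pvNormCore (cs : List Char) : List Char :=
  let normalized := pvNormName cs
  let tokens := (PySem.Chars.split₀ normalized).filter (fun t => !(pvLegalSuffixTokens.contains t))
  if tokens.isEmpty then normalized else PySem.Chars.join [' '] tokens

-- the overlap test of A's inner loop (identical text in both Pythons)
def pvOverlapHit (ctoks atoks : List (List Char)) : Bool :=
  !ctoks.isEmpty && !atoks.isEmpty &&
    (let overlap := PySem.Set.len (PySem.Set.inter (PySem.Set.ofList ctoks) (PySem.Set.ofList atoks))
     decide (overlap = (min ctoks.length atoks.length : Int)) && decide (2 ≤ overlap))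

-- A's 'for alias_core in alias_cores' loop (with continue / early returns)
def pvLoopA (cc : List Char) (ctoks : List (List Char)) : List (List Char) → Bool
  | [] => false
  | ac :: rest =>
    if ac.isEmpty then pvLoopA cc ctoks rest
    else if cc == ac then true
    else if PySem.Chars.startswith cc (ac ++ [' ']) || PySem.Chars.startswith ac (cc ++ [' ']) then true
    else if pvOverlapHit ctoks (PySem.Chars.split₀ ac) then true
    else pvLoopA cc ctoks rest

def matches_directory_entry (candidate_name : String) (entry : List (String × List String)) : Bool :=
  match PySem.Dict.get? (PySem.Dict.mk entry) "aliases" with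
  | none => false   -- Python raises KeyError here; excluded by Pre_
  | some (aliases : List String) =>
    let candidate := pvNormName candidate_name.toList
    let candidate_core := pvNormCore candidate_name.toList
    let alias_names := aliases.map (fun a => pvNormName a.toList)
    let alias_cores := aliases.map (fun a => pvNormCore a.toList)
    if alias_names.contains candidate || alias_cores.contains candidate then true
    else if !candidate_core.isEmpty && (alias_names.contains candidate_core || alias_cores.contains candidate_core) then true
    else if !candidate_core.isEmpty then pvLoopA candidate_core (PySem.Chars.split₀ candidate_core) alias_cores
    else false

-- ===== PORT B =====
def pvAliasMatches (candidate cc : List Char) (ctoks : List (List Char)) (al : List Char) : Bool :=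
  let an := pvNormName al
  let ac := pvNormCore al
  if candidate == an || candidate == ac then true
  else if !cc.isEmpty && (cc == an || cc == ac) then true
  else if !cc.isEmpty && !ac.isEmpty then
    if PySem.Chars.startswith cc (ac ++ [' ']) || PySem.Chars.startswith ac (cc ++ [' ']) then true
    else pvOverlapHit ctoks (PySem.Chars.split₀ ac)
  else false

def matches_directory_entry_alt (candidate_name : String) (entry : List (String × List String)) : Bool :=
  match PySem.Dict.get? (PySem.Dict.mk entry) "aliases" with
  | none => false   -- Python raises KeyError here; excluded by Pre_
  | some (aliases : List String) =>
    let candidate := pvNormName candidate_name.toList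
    let candidate_core := pvNormCore candidate_name.toList
    let candidate_tokens := PySem.Chars.split₀ candidate_core
    aliases.any (fun al => pvAliasMatches candidate candidate_core candidate_tokens al.toList)

-- ===== PRECONDITION & SPEC =====
-- Pre_ excludes exactly the inputs where A raises KeyError: entries without an "aliases" key.
def Pre_matches_directory_entry (candidate_name : String) (entry : List (String × List String)) : Prop :=
  (PySem.Dict.get? (PySem.Dict.mk entry) "aliases").isSome = true
instance (candidate_name : String) (entry : List (String × List String)) : Decidable (Pre_matches_directory_entry candidate_name entry) := by unfold Pre_matches_directory_entry; infer_instance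

def pvWitness_matches_directory_entry : String × (List (String × List String)) :=
  ("Acme Ltd", [("aliases", ["Acme Corp", "acme"])])

def Spec_matches_directory_entry (candidate_name : String) (entry : List (String × List String)) (out : Bool) : Prop := out = matches_directory_entry_alt candidate_name entry
instance (candidate_name : String) (entry : List (String × List String)) (out : Bool) : Decidable (Spec_matches_directory_entry candidate_name entry out) := by unfold Spec_matches_directory_entry; infer_instance

-- ===== CLAIM (what is proved, stated in full; the proofs are below) =====
def Claim_equal_matches_directory_entry : Prop := ∀ (candidate_name : String) (entry : List (String × List String)), Dom_matches_directory_entry candidate_name entry → Pre_matches_directory_entry candidate_name entry → Spec_matches_directory_entry candidate_name entry (matches_directory_entry candidate_name entry)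

-- ===== LEMMAS AND PROOFS =====

-- A's inner loop is an 'any' over the alias cores
theorem pvLoopA_eq_any (cc : List Char) (ctoks : List (List Char)) (cores : List (List Char)) :
    pvLoopA cc ctoks cores =
      cores.any (fun ac => !ac.isEmpty &&
        (cc == ac || PySem.Chars.startswith cc (ac ++ [' ']) || PySem.Chars.startswith ac (cc ++ [' ']) ||
          pvOverlapHit ctoks (PySem.Chars.split₀ ac))) := by
  induction cores with
  | nil => rfl
  | cons ac rest ih =>
    simp only [pvLoopA, List.any_cons, ← ih]
    by_cases h1 : ac.isEmpty = true <;>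
      by_cases h2 : (cc == ac) = true <;>
      by_cases h3 : (PySem.Chars.startswith cc (ac ++ [' ']) || PySem.Chars.startswith ac (cc ++ [' '])) = true <;>
      by_cases h4 : pvOverlapHit ctoks (PySem.Chars.split₀ ac) = true <;>
      simp_all [Bool.or_assoc]

-- B's per-alias test, flattened to the disjunction of its return-true paths
theorem pvAliasMatches_eq (candidate cc : List Char) (ctoks : List (List Char)) (al : List Char) :
    pvAliasMatches candidate cc ctoks al =
      (candidate == pvNormName al || candidate == pvNormCore al ||
       (!cc.isEmpty && (cc == pvNormName al || cc == pvNormCore al)) ||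
       (!cc.isEmpty && !(pvNormCore al).isEmpty &&
         (PySem.Chars.startswith cc (pvNormCore al ++ [' ']) ||
          PySem.Chars.startswith (pvNormCore al) (cc ++ [' ']) ||
          pvOverlapHit ctoks (PySem.Chars.split₀ (pvNormCore al))))) := by
  simp only [pvAliasMatches]
  generalize (candidate == pvNormName al) = a1
  generalize (candidate == pvNormCore al) = a2
  generalize List.isEmpty cc = a3
  generalize (cc == pvNormName al) = a4
  generalize (cc == pvNormCore al) = a5
  generalize PySem.Chars.startswith cc (pvNormCore al ++ [' ']) = a7
  generalize PySem.Chars.startswith (pvNormCore al) (cc ++ [' ']) = a8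
  generalize pvOverlapHit ctoks (PySem.Chars.split₀ (pvNormCore al)) = a9
  generalize List.isEmpty (pvNormCore al) = a6
  revert a1 a2 a3 a4 a5 a6 a7 a8 a9
  decide

set_option maxHeartbeats 2000000 in
theorem matches_directory_entry_eq_alt (candidate_name : String) (entry : List (String × List String))
    (hpre : (PySem.Dict.get? (PySem.Dict.mk entry) "aliases").isSome = true) :
    matches_directory_entry candidate_name entry = matches_directory_entry_alt candidate_name entry := by
  unfold matches_directory_entry matches_directory_entry_alt
  cases hget : PySem.Dict.get? (PySem.Dict.mk entry) "aliases" with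
  | none => exact absurd (hget ▸ hpre) (by decide)
  | some aliases =>
    simp only [pvLoopA_eq_any, pvAliasMatches_eq, List.contains_eq_any_beq, List.any_map]
    rw [Bool.eq_iff_iff]
    simp only [List.any_eq_true, Bool.or_eq_true, Bool.and_eq_true, Bool.not_eq_true',
      beq_iff_eq, List.isEmpty_eq_false_iff]
    split_ifs with h1 h2 h3
    · simp only [Function.comp_def, beq_iff_eq] at h1
      constructor
      · intro _
        rcases h1 with ⟨a, ha, h⟩ | ⟨a, ha, h⟩
        · exact ⟨a, ha, Or.inl (Or.inl (Or.inl h))⟩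
        · exact ⟨a, ha, Or.inl (Or.inl (Or.inr h))⟩
      · intro _; rfl
    · obtain ⟨hne, h⟩ := h2
      simp only [Function.comp_def, beq_iff_eq] at h
      constructor
      · intro _
        rcases h with ⟨a, ha, hh⟩ | ⟨a, ha, hh⟩
        · exact ⟨a, ha, Or.inl (Or.inr ⟨hne, Or.inl hh⟩)⟩
        · exact ⟨a, ha, Or.inl (Or.inr ⟨hne, Or.inr hh⟩)⟩
      · intro _; rfl
    · simp only [Function.comp_def, beq_iff_eq, not_or, not_exists, not_and] at h1 h2
      simp only [Function.comp_def, List.any_eq_true, Bool.and_eq_true, Bool.or_eq_true,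
        Bool.not_eq_true', List.isEmpty_eq_false_iff, beq_iff_eq]
      replace h2 := h2 h3
      constructor
      · rintro ⟨a, ha, hrest⟩
        refine ⟨a, ha, ?_⟩
        obtain ⟨hne, hr⟩ := hrest
        rcases hr with ((heq | hp1) | hp2) | hov
        · exact Or.inl (Or.inr ⟨h3, Or.inr heq⟩)
        · exact Or.inr ⟨⟨h3, hne⟩, Or.inl (Or.inl hp1)⟩
        · exact Or.inr ⟨⟨h3, hne⟩, Or.inl (Or.inr hp2)⟩
        · exact Or.inr ⟨⟨h3, hne⟩, Or.inr hov⟩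
      · rintro ⟨a, ha, hbig⟩
        have e1 := h1.1 a ha
        have e2 := h1.2 a ha
        have e3 := h2.1 a ha
        have e4 := h2.2 a ha
        rcases hbig with ((h | h) | ⟨_, hh⟩) | ⟨⟨_, hne⟩, hh⟩
        · exact absurd h e1
        · exact absurd h e2
        · rcases hh with h | h
          · exact absurd h e3
          · exact absurd h e4
        · refine ⟨a, ha, hne, ?_⟩
          rcases hh with (p | p) | p
          · exact Or.inl (Or.inl (Or.inr p))
          · exact Or.inl (Or.inr p)
          · exact Or.inr p
    · simp only [not_not] at h3
      simp only [Function.comp_def, beq_iff_eq, not_or, not_exists, not_and] at h1 h2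
      simp only [false_iff, not_exists]
      intro a ha
      obtain ⟨ha, hbig⟩ := ha
      have e1 := h1.1 a ha
      have e2 := h1.2 a ha
      rcases hbig with ((h | h) | ⟨hne, _⟩) | ⟨⟨hne, _⟩, _⟩
      · exact e1 h
      · exact e2 h
      · exact hne h3
      · exact hne h3

-- ===== VERDICT (by name: the statement is the Claim_ definition above) =====
theorem matches_directory_entry_spec : Claim_equal_matches_directory_entry := by
  intro candidate_name entry _ hpre
  exact matches_directory_entry_eq_alt candidate_name entry hpre
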